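-- pv_equiv track=rewrite | github.com/henrypinkard/pretty_testing | recurse/examples/wrong_order_of_operations.py | print_countdown
-- ===== SOURCE A (Python) =====
-- def print_countdown(n, results=None):
--     """Print countdown but wrong order (counts up instead).
--
--     Bug: Prints after recursion instead of before.
--     Result: Prints 1, 2, 3, ... instead of n, n-1, n-2, ...
--     """
--     if results is None:
--         results = []
--
--     if n <= 0:
--         return results
--
--     # Wrong order: should print n first, then recurse
--     print_countdown(n - 1, results)
--     results.append(n)
--     return results
-- ===== SOURCE B (Python) =====
-- def print_countdown(n, results=None):
--     """Iterative rewrite: appends 1..n to results with an explicit loop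
--     (mutates and returns the same list object, like A)."""
--     if results is None:
--         results = []
--     for i in range(1, n + 1):
--         results.append(i)
--     return results
-- ===== Notes on version B (the rewrite author's own statement) =====
-- stated objective: simpler
-- what changed: Replaced the accumulator-passing tail recursion with a single explicit for-loop over range(1, n+1) appending each counter value; Pre_ excludes n >= 998, where A's n-deep recursion exceeds CPython's default recursion limit (1000) and raises RecursionError (B returns the same list on any larger n an interpreter with a raised limit still accepts).
import Mathlib
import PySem

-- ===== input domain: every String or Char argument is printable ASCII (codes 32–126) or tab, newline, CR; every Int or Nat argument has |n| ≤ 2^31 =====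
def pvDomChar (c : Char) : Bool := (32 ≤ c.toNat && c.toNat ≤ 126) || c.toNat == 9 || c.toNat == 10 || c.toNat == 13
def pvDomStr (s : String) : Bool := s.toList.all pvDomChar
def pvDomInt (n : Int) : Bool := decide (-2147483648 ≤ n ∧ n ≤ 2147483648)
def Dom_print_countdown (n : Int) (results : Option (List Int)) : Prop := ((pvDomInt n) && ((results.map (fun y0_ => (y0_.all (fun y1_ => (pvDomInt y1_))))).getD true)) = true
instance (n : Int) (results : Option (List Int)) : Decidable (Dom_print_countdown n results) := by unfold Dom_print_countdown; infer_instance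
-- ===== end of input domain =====

-- ===== PORT A =====
-- B replaces A's accumulator-passing recursion with one explicit loop; return-value equivalence only
-- (both Pythons mutate and return the same passed-in list object; the ports model the returned value).
-- pcGo n rs mirrors A's body: if n <= 0: return results; else recurse on n-1, then append n
def pcGo (n : Int) (rs : List Int) : List Int :=
  if n ≤ 0 then rs
  else pcGo (n - 1) rs ++ [n]
termination_by n.toNat
decreasing_by omega

def print_countdown (n : Int) (results : Option (List Int)) : List Int :=
  pcGo n (results.getD [])

-- ===== PORT B =====
def print_countdown_alt (n : Int) (results : Option (List Int)) : List Int :=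
  (PySem.List.pyRange 1 (n + 1) 1).foldl (fun acc i => acc ++ [i]) (results.getD [])

-- ===== PRECONDITION & SPEC =====
-- Pre_ excludes n ≥ 998: there A's n-deep recursion exceeds CPython's default recursion
-- limit (1000) and A raises RecursionError (first raising n measured at 998); an interpreter
-- run with a raised limit still returns for somewhat larger n, a band Pre_ excludes as
-- interpreter-dependent (B returns the same list there; see the cite).
def Pre_print_countdown (n : Int) (results : Option (List Int)) : Prop := n ≤ 997
instance (n : Int) (results : Option (List Int)) : Decidable (Pre_print_countdown n results) := by unfold Pre_print_countdown; infer_instance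
def pvWitness_print_countdown : Int × Option (List Int) := (5, some [9])

def Spec_print_countdown (n : Int) (results : Option (List Int)) (out : List Int) : Prop := out = print_countdown_alt n results
instance (n : Int) (results : Option (List Int)) (out : List Int) : Decidable (Spec_print_countdown n results out) := by unfold Spec_print_countdown; infer_instance

-- ===== CLAIM (what is proved, stated in full; the proofs are below) =====
def Claim_equal_print_countdown : Prop := ∀ (n : Int) (results : Option (List Int)), Dom_print_countdown n results → Pre_print_countdown n results → Spec_print_countdown n results (print_countdown n results)

-- ===== LEMMAS AND PROOFS =====
theorem foldl_append_singleton (l : List Int) (init : List Int) :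
    l.foldl (fun acc i => acc ++ [i]) init = init ++ l := by
  induction l generalizing init with
  | nil => simp
  | cons x xs ih => simp [List.foldl, ih]

theorem pcGo_eq (n : Int) (rs : List Int) :
    pcGo n rs = rs ++ PySem.List.pyRange 1 (n + 1) 1 := by
  by_cases h : n ≤ 0
  · rw [pcGo, if_pos h, PySem.List.pyRange_one_eq_nil (by omega), List.append_nil]
  · have h1 : (n - 1) + 1 = n := by omega
    rw [pcGo, if_neg h, pcGo_eq (n - 1) rs, h1,
        PySem.List.pyRange_one_succ_right (a := 1) (b := n) (by omega)]
    rw [List.append_assoc]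
termination_by n.toNat
decreasing_by omega

-- ===== VERDICT (by name: the statement is the Claim_ definition above) =====
theorem print_countdown_spec : Claim_equal_print_countdown := by
  intro n results _ _
  unfold Spec_print_countdown print_countdown print_countdown_alt
  rw [pcGo_eq, foldl_append_singleton]
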